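-- pv_equiv track=rewrite | github.com/awslabs/automated-security-helper | automated_security_helper/utils/meta_analysis/merge_field_paths.py | merge_field_paths
-- ===== SOURCE A (Python) =====
-- from typing import Dict, List, Set
--
-- def merge_field_paths(
--     all_paths: List[Dict[str, Dict[str, Set[str]]]],
-- ) -> Dict[str, Dict[str, Set[str]]]:
--     """
--     Merge multiple field path dictionaries.
--
--     Args:
--         all_paths: List of field path dictionaries
--
--     Returns:
--         Merged dictionary
--     """
--     merged = {}
--
--     for paths in all_paths:
--         for path, info in paths.items():
--             if path not in merged:
--                 merged[path] = {"type": set(), "scanners": set()}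
--
--             # Merge types and scanners
--             merged[path]["type"].update(info["type"])
--             merged[path]["scanners"].update(info["scanners"])
--
--     return merged
-- ===== SOURCE B (Python) =====
-- from typing import Dict, List, Set
--
--
-- def merge_field_paths(
--     all_paths: List[Dict[str, Dict[str, Set[str]]]],
-- ) -> Dict[str, Dict[str, Set[str]]]:
--     # Collect pass: index each path to the lists of type-sets and scanner-sets seen.
--     index = {}
--     for paths in all_paths:
--         for path, info in paths.items():
--             t, s = info["type"], info["scanners"]
--             if path in index:
--                 type_sets, scanner_sets = index[path]
--                 type_sets.append(t)
--                 scanner_sets.append(s)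
--             else:
--                 index[path] = ([t], [s])
--     # Reduce pass: union everything collected for each path.
--     return {
--         path: {"type": set().union(*type_sets), "scanners": set().union(*scanner_sets)}
--         for path, (type_sets, scanner_sets) in index.items()
--     }
-- ===== Notes on version B (the rewrite author's own statement) =====
-- stated objective: alternative
-- what changed: Replaces A's incremental in-place merging into a nested dict with a two-pass collect-then-reduce: a first pass indexes each path to the lists of type/scanner sets seen, a second pass unions each list at once.
import Mathlib
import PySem

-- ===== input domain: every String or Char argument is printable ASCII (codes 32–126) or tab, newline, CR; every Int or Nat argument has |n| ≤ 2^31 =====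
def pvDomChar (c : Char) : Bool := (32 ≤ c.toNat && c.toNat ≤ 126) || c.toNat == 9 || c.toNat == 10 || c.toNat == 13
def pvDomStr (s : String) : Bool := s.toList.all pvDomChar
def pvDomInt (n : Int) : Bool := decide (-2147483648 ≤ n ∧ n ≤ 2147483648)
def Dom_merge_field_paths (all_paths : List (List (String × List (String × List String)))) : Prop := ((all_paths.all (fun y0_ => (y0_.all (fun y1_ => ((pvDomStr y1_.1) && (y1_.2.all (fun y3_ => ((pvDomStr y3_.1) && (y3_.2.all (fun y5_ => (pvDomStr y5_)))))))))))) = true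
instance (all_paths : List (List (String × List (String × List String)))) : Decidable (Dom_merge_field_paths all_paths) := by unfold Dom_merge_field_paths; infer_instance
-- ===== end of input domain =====

-- B replaces A's incremental in-place nested-dict merging with a collect pass (index each
-- path to the lists of type/scanner sets seen) followed by a reduce pass that unions each
-- list; an alternative decomposition of the same cost.

-- ===== PORT A =====
-- one step of A's inner loop: ensure the path entry exists, then update its two sets
def pvStepA (merged : PySem.Dict String (PySem.Dict String (PySem.Set String)))
    (pi : String × List (String × List String)) :
    PySem.Dict String (PySem.Dict String (PySem.Set String)) :=
  let path := pi.1
  let info := PySem.Dict.mk pi.2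
  let m1 := if merged.contains path then merged
            else merged.insert path (PySem.Dict.mk [("type", PySem.Set.empty), ("scanners", PySem.Set.empty)])
  -- info["type"] / info["scanners"]: KeyError (= default never used) excluded by Pre_
  let m2 := m1.modify path PySem.Dict.empty
              (fun d => d.modify "type" PySem.Set.empty (fun s => PySem.Set.update s (info.getD "type" [])))
  m2.modify path PySem.Dict.empty
    (fun d => d.modify "scanners" PySem.Set.empty (fun s => PySem.Set.update s (info.getD "scanners" [])))

def merge_field_paths (all_paths : List (List (String × List (String × List String)))) : List (String × List (String × List String)) :=
  let merged := all_paths.foldl (fun merged paths => paths.foldl pvStepA merged) PySem.Dict.empty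
  merged.items.map (fun pd => (pd.1, pd.2.items))

-- ===== PORT B =====
-- set().union(*sets): fold the update over the collected list of sets
def pvUnionAll (ls : List (List String)) : PySem.Set String :=
  ls.foldl PySem.Set.update PySem.Set.empty

-- one step of B's collect pass
def pvStepB (idx : PySem.Dict String (List (List String) × List (List String)))
    (pi : String × List (String × List String)) :
    PySem.Dict String (List (List String) × List (List String)) :=
  let path := pi.1
  let info := PySem.Dict.mk pi.2
  let t := info.getD "type" []
  let s := info.getD "scanners" []
  match idx.get? path with
  | some (ts, ss) => idx.insert path (ts ++ [t], ss ++ [s])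
  | none => idx.insert path ([t], [s])

def merge_field_paths_alt (all_paths : List (List (String × List (String × List String)))) : List (String × List (String × List String)) :=
  let index := all_paths.foldl (fun idx paths => paths.foldl pvStepB idx) PySem.Dict.empty
  index.items.map (fun pd =>
    (pd.1, [("type", (pvUnionAll pd.2.1 : List String)), ("scanners", (pvUnionAll pd.2.2 : List String))]))

-- ===== PRECONDITION & SPEC =====
-- Pre_ excludes exactly the inputs on which Python A raises KeyError: some info dict
-- lacking a "type" or a "scanners" key.
def Pre_merge_field_paths (all_paths : List (List (String × List (String × List String)))) : Prop :=
  (all_paths.all (fun paths => paths.all (fun pi =>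
    (pi.2.any (fun kv => kv.1 == "type")) && (pi.2.any (fun kv => kv.1 == "scanners"))))) = true
instance (all_paths : List (List (String × List (String × List String)))) : Decidable (Pre_merge_field_paths all_paths) := by unfold Pre_merge_field_paths; infer_instance

def pvWitness_merge_field_paths : (List (List (String × List (String × List String)))) :=
  [[("root.id", [("type", ["str"]), ("scanners", ["bandit"])])],
   [("root.id", [("type", ["int"]), ("scanners", ["semgrep"])]),
    ("root.x",  [("type", []), ("scanners", ["bandit"])])]]

def Spec_merge_field_paths (all_paths : List (List (String × List (String × List String)))) (out : List (String × List (String × List String))) : Prop := out = merge_field_paths_alt all_paths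
instance (all_paths : List (List (String × List (String × List String)))) (out : List (String × List (String × List String))) : Decidable (Spec_merge_field_paths all_paths out) := by unfold Spec_merge_field_paths; infer_instance

-- ===== CLAIM (what is proved, stated in full; the proofs are below) =====
def Claim_equal_merge_field_paths : Prop := ∀ (all_paths : List (List (String × List (String × List String)))), Dom_merge_field_paths all_paths → Pre_merge_field_paths all_paths → Spec_merge_field_paths all_paths (merge_field_paths all_paths)

-- ===== LEMMAS AND PROOFS =====

-- the function applied pointwise by the reduce pass
def pvG (pd : String × (List (List String) × List (List String))) :
    String × PySem.Dict String (PySem.Set String) :=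
  (pd.1, PySem.Dict.mk [("type", pvUnionAll pd.2.1), ("scanners", pvUnionAll pd.2.2)])

-- the reduce pass, applied to an intermediate index, yields A's intermediate merged dict
def pvReduce (idx : PySem.Dict String (List (List String) × List (List String))) :
    PySem.Dict String (PySem.Dict String (PySem.Set String)) :=
  PySem.Dict.mk (idx.items.map pvG)

def pvKeysNodup (idx : PySem.Dict String (List (List String) × List (List String))) : Prop :=
  (idx.items.map Prod.fst).Nodup

-- items of an insert, written out (definitional)
def pvRep {ν : Type} (k : String) (v : ν) (L : List (String × ν)) : List (String × ν) :=
  L.map (fun p => if p.1 == k then (k, v) else p)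

theorem pvInsertItems {ν : Type} (L : List (String × ν)) (k : String) (v : ν) :
    ((PySem.Dict.mk L).insert k v).items
      = if (L.any fun p => p.1 == k) = true then pvRep k v L else L ++ [(k, v)] := by
  simp only [PySem.Dict.insert, PySem.Dict.contains, pvRep]
  split <;> rfl

theorem pvRep_eq_self {ν : Type} {k : String} {L : List (String × ν)} (v : ν)
    (h : ∀ p ∈ L, (p.1 == k) = false) : pvRep k v L = L := by
  unfold pvRep
  have h' : ∀ p ∈ L, (if p.1 == k then (k, v) else p) = id p := fun p hp => by
    simp [h p hp]
  rw [List.map_congr_left h', List.map_id]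

theorem pvRep_keys {ν : Type} (k : String) (v : ν) (L : List (String × ν)) :
    (pvRep k v L).map Prod.fst = L.map Prod.fst := by
  unfold pvRep
  rw [List.map_map, List.map_congr_left]
  intro p _
  by_cases hpk : p.1 = k <;> simp [hpk]

theorem pvNoMatch_of_not_contains {ν : Type} {L : List (String × ν)} {k : String}
    (h : ¬ (PySem.Dict.mk L).contains k = true) : ∀ p ∈ L, (p.1 == k) = false := by
  intro p hp
  by_contra hne
  exact h (List.any_eq_true.mpr ⟨p, hp, by simpa using hne⟩)

theorem pvFind?_no {ν : Type} {L : List (String × ν)} {k : String}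
    (h : ∀ p ∈ L, (p.1 == k) = false) : L.find? (fun p => p.1 == k) = none :=
  List.find?_eq_none.mpr (fun p hp => by simp [h p hp])

theorem pvGet?_eq_none {ν : Type} {L : List (String × ν)} {k : String}
    (h : ¬ (PySem.Dict.mk L).contains k = true) : (PySem.Dict.mk L).get? k = none := by
  simp only [PySem.Dict.get?, pvFind?_no (pvNoMatch_of_not_contains h), Option.map_none]

-- lookup / overwrite / modify at a decomposed position X ++ (k, v) :: Y, k fresh in X and Y
theorem pvGet?_at {ν : Type} {X : List (String × ν)} (Y : List (String × ν)) {k : String}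
    (v : ν) (hX : ∀ p ∈ X, (p.1 == k) = false) :
    (PySem.Dict.mk (X ++ (k, v) :: Y)).get? k = some v := by
  simp only [PySem.Dict.get?, List.find?_append, pvFind?_no hX, Option.none_or]
  rw [List.find?_cons_of_pos (by simp)]
  rfl

theorem pvInsert_at {ν : Type} {X Y : List (String × ν)} {k : String} (v0 v : ν)
    (hX : ∀ p ∈ X, (p.1 == k) = false) (hY : ∀ p ∈ Y, (p.1 == k) = false) :
    (PySem.Dict.mk (X ++ (k, v0) :: Y)).insert k v = PySem.Dict.mk (X ++ (k, v) :: Y) := by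
  apply PySem.Dict.ext
  rw [pvInsertItems, if_pos (List.any_eq_true.mpr ⟨(k, v0), by simp, by simp⟩)]
  unfold pvRep
  rw [List.map_append, List.map_cons, ← pvRep.eq_def, ← pvRep.eq_def,
    pvRep_eq_self _ hX, pvRep_eq_self _ hY, if_pos (by simp)]

theorem pvModify_at {ν : Type} {X Y : List (String × ν)} {k : String} (v0 dflt : ν)
    (f : ν → ν) (hX : ∀ p ∈ X, (p.1 == k) = false) (hY : ∀ p ∈ Y, (p.1 == k) = false) :
    (PySem.Dict.mk (X ++ (k, v0) :: Y)).modify k dflt f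
      = PySem.Dict.mk (X ++ (k, f v0) :: Y) := by
  rw [PySem.Dict.modify, PySem.Dict.getD, pvGet?_at Y v0 hX, Option.getD_some,
    pvInsert_at v0 (f v0) hX hY]

theorem pvInsert_fresh {ν : Type} {L : List (String × ν)} {k : String} (v : ν)
    (h : ∀ p ∈ L, (p.1 == k) = false) :
    (PySem.Dict.mk L).insert k v = PySem.Dict.mk (L ++ [(k, v)]) := by
  apply PySem.Dict.ext
  rw [pvInsertItems, if_neg]
  simp only [List.any_eq_true, not_exists, not_and]
  intro p hp
  simp [h p hp]

theorem pvKeysNodup_insert {ν : Type} (L : List (String × ν)) (k : String) (v : ν)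
    (h : (L.map Prod.fst).Nodup) :
    ((((PySem.Dict.mk L).insert k v)).items.map Prod.fst).Nodup := by
  rw [pvInsertItems]
  by_cases hany : (L.any fun p => p.1 == k) = true
  · rw [if_pos hany, pvRep_keys]; exact h
  · rw [if_neg hany, List.map_append]
    have hk : k ∉ L.map Prod.fst := by
      intro hk
      obtain ⟨p, hp, hpk⟩ := List.mem_map.mp hk
      exact hany (List.any_eq_true.mpr ⟨p, hp, by simp [hpk]⟩)
    rw [List.nodup_append]
    refine ⟨h, List.nodup_singleton _, fun a ha b hb hab => hk ?_⟩
    simp only [List.map_cons, List.map_nil, List.mem_singleton] at hb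
    subst hab
    rw [hb] at ha
    exact ha

theorem pvNodup_stepB (idx : PySem.Dict String (List (List String) × List (List String)))
    (pi : String × List (String × List String)) (h : pvKeysNodup idx) :
    pvKeysNodup (pvStepB idx pi) := by
  obtain ⟨L⟩ := idx
  unfold pvKeysNodup pvStepB
  dsimp only
  cases hget : (PySem.Dict.mk L).get? pi.1 with
  | none => exact pvKeysNodup_insert L _ _ h
  | some v => obtain ⟨ts, ss⟩ := v; exact pvKeysNodup_insert L _ _ h

theorem pvNoMatch_map {L : List (String × (List (List String) × List (List String)))} {k : String}
    (h : ∀ p ∈ L, (p.1 == k) = false) : ∀ q ∈ L.map pvG, (q.1 == k) = false := by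
  intro q hq
  obtain ⟨p, hp, rfl⟩ := List.mem_map.mp hq
  exact h p hp

theorem pvContains_reduce (idx : PySem.Dict String (List (List String) × List (List String)))
    (k : String) : (pvReduce idx).contains k = idx.contains k := by
  simp only [pvReduce, PySem.Dict.contains, List.any_map]
  rfl

theorem pvUnionAll_snoc (ts : List (List String)) (t : List String) :
    pvUnionAll (ts ++ [t]) = PySem.Set.update (pvUnionAll ts) t := by
  simp [pvUnionAll, List.foldl_append, PySem.Set.update]

-- updating the two-entry inner dict = extending the collected lists
theorem pvF1 (ts ss : List (List String)) (t : List String) :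
    (PySem.Dict.mk [("type", pvUnionAll ts), ("scanners", pvUnionAll ss)]).modify "type"
        PySem.Set.empty (fun x => PySem.Set.update x t)
      = PySem.Dict.mk [("type", pvUnionAll (ts ++ [t])), ("scanners", pvUnionAll ss)] := by
  rw [pvUnionAll_snoc]
  simp [PySem.Dict.modify, PySem.Dict.insert, PySem.Dict.getD, PySem.Dict.get?,
    PySem.Dict.contains]

theorem pvF2 (ts ss : List (List String)) (s : List String) :
    (PySem.Dict.mk [("type", pvUnionAll ts), ("scanners", pvUnionAll ss)]).modify "scanners"
        PySem.Set.empty (fun x => PySem.Set.update x s)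
      = PySem.Dict.mk [("type", pvUnionAll ts), ("scanners", pvUnionAll (ss ++ [s]))] := by
  rw [pvUnionAll_snoc]
  simp [PySem.Dict.modify, PySem.Dict.insert, PySem.Dict.getD, PySem.Dict.get?,
    PySem.Dict.contains]

theorem pvComm (idx : PySem.Dict String (List (List String) × List (List String)))
    (pi : String × List (String × List String)) (h : pvKeysNodup idx) :
    pvStepA (pvReduce idx) pi = pvReduce (pvStepB idx pi) := by
  obtain ⟨L⟩ := idx
  unfold pvKeysNodup at h
  unfold pvStepA pvStepB
  dsimp only
  by_cases hc : (PySem.Dict.mk L).contains pi.1 = true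
  · -- path already present: decompose L around its unique entry for the path
    obtain ⟨p, hp, hpk⟩ := List.any_eq_true.mp hc
    obtain ⟨P, S, rfl⟩ := List.append_of_mem hp
    obtain ⟨k0, ts, ss⟩ := p
    have hk0 : k0 = pi.1 := by simpa using hpk
    subst hk0
    have hPS : (pi.1 ∉ P.map Prod.fst) ∧ (pi.1 ∉ S.map Prod.fst) := by
      rw [PySem.Dict.items, List.map_append, List.map_cons, List.nodup_append] at h
      obtain ⟨_, h2, h3⟩ := h
      exact ⟨fun hmem => h3 pi.1 hmem pi.1 List.mem_cons_self rfl, (List.nodup_cons.mp h2).1⟩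
    have hP : ∀ q ∈ P, (q.1 == pi.1) = false := fun q hq => by
      simpa using fun he => hPS.1 (List.mem_map.mpr ⟨q, hq, he⟩)
    have hS : ∀ q ∈ S, (q.1 == pi.1) = false := fun q hq => by
      simpa using fun he => hPS.2 (List.mem_map.mpr ⟨q, hq, he⟩)
    rw [pvGet?_at S (ts, ss) hP]
    dsimp only
    have hred : pvReduce (PySem.Dict.mk (P ++ (pi.1, ts, ss) :: S))
        = PySem.Dict.mk (P.map pvG
            ++ (pi.1, PySem.Dict.mk [("type", pvUnionAll ts), ("scanners", pvUnionAll ss)])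
            :: S.map pvG) := by
      simp only [pvReduce, List.map_append, List.map_cons]
      rfl
    have hcA : (pvReduce (PySem.Dict.mk (P ++ (pi.1, ts, ss) :: S))).contains pi.1 = true := by
      rw [pvContains_reduce]; exact hc
    rw [if_pos hcA, hred,
      pvModify_at _ _ _ (pvNoMatch_map hP) (pvNoMatch_map hS), pvF1,
      pvModify_at _ _ _ (pvNoMatch_map hP) (pvNoMatch_map hS), pvF2,
      pvInsert_at _ _ hP hS]
    simp only [pvReduce, List.map_append, List.map_cons]
    rfl
  · -- fresh path: both sides append a new entry at the end
    have hnm := pvNoMatch_of_not_contains hc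
    rw [pvGet?_eq_none hc]
    dsimp only
    have hcA : ¬ (pvReduce (PySem.Dict.mk L)).contains pi.1 = true := by
      rw [pvContains_reduce]; exact hc
    rw [if_neg hcA]
    have hredL : pvReduce (PySem.Dict.mk L) = PySem.Dict.mk (L.map pvG) := rfl
    have hD0 : PySem.Dict.mk [("type", (PySem.Set.empty : PySem.Set String)),
          ("scanners", PySem.Set.empty)]
        = PySem.Dict.mk [("type", pvUnionAll []), ("scanners", pvUnionAll [])] := rfl
    rw [hredL, pvInsert_fresh _ (pvNoMatch_map hnm), hD0]
    have hnil : ∀ p ∈ ([] : List (String × PySem.Dict String (PySem.Set String))),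
        (p.1 == pi.1) = false := by intro p hp; cases hp
    rw [show L.map pvG ++ [(pi.1, PySem.Dict.mk [("type", pvUnionAll []), ("scanners", pvUnionAll [])])]
          = L.map pvG ++ (pi.1, PySem.Dict.mk [("type", pvUnionAll []), ("scanners", pvUnionAll [])]) :: []
        from rfl,
      pvModify_at _ _ _ (pvNoMatch_map hnm) hnil, pvF1,
      pvModify_at _ _ _ (pvNoMatch_map hnm) hnil, pvF2,
      pvInsert_fresh _ hnm]
    simp only [pvReduce, List.map_append, List.map_cons]
    rfl

theorem pvInner (paths : List (String × List (String × List String)))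
    (idx : PySem.Dict String (List (List String) × List (List String))) (h : pvKeysNodup idx) :
    paths.foldl pvStepA (pvReduce idx) = pvReduce (paths.foldl pvStepB idx)
    ∧ pvKeysNodup (paths.foldl pvStepB idx) := by
  induction paths generalizing idx with
  | nil => exact ⟨rfl, h⟩
  | cons p rest ih =>
    simp only [List.foldl_cons]
    rw [pvComm idx p h]
    exact ih _ (pvNodup_stepB idx p h)

theorem pvOuter (all_paths : List (List (String × List (String × List String))))
    (idx : PySem.Dict String (List (List String) × List (List String))) (h : pvKeysNodup idx) :
    all_paths.foldl (fun m paths => paths.foldl pvStepA m) (pvReduce idx)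
      = pvReduce (all_paths.foldl (fun i paths => paths.foldl pvStepB i) idx)
    ∧ pvKeysNodup (all_paths.foldl (fun i paths => paths.foldl pvStepB i) idx) := by
  induction all_paths generalizing idx with
  | nil => exact ⟨rfl, h⟩
  | cons paths rest ih =>
    simp only [List.foldl_cons]
    obtain ⟨he, hn⟩ := pvInner paths idx h
    rw [he]
    exact ih _ hn

-- ===== VERDICT (by name: the statement is the Claim_ definition above) =====
theorem merge_field_paths_spec : Claim_equal_merge_field_paths := by
  intro all_paths _ _
  unfold Spec_merge_field_paths merge_field_paths merge_field_paths_alt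
  have h0 : pvKeysNodup PySem.Dict.empty := by simp [pvKeysNodup, PySem.Dict.empty]
  have hred : pvReduce PySem.Dict.empty = PySem.Dict.empty := rfl
  obtain ⟨he, _⟩ := pvOuter all_paths PySem.Dict.empty h0
  rw [hred] at he
  rw [he]
  simp only [pvReduce, List.map_map]
  rfl
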